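-- pv_equiv track=rewrite | github.com/cchrewrite/ambm | ambm_ver_0.2.0/src/python/RepSimpLib.py | make_partial_order_relation_of_set
-- ===== SOURCE A (Python) =====
-- def set_to_string(s):
--     y = "bset"
--     ss = sorted(s)
--     for x in ss:
--         y = y + "_" + str(x)
--     if y == "bset":
--         y = "bsetEmpty"
--     return y
--
-- def make_set_names(P):
--     res = []
--     for x in P:
--         y = set_to_string(x)
--         res.append(y)
--     return res
--
-- def sub_sets(S, N = -1):
--
--     subsets = [[]]
--
--     if N == -1:
--         MaxN = len(S)
--     else:
--         MaxN = N
--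
--     while True:
--         newsets = []
--         for x in subsets:
--             for u in S:
--                 if u in x: continue
--                 y = sorted(x + [u])
--                 if y in subsets: continue
--                 if y in newsets: continue
--                 if len(y) > MaxN: continue
--                 newsets.append(y)
--                 flag = True
--         if newsets == []: break
--         subsets = subsets + newsets
--     subsets = sorted(subsets)
--     """
--     for i in range(len(S) + 1):
--
--         for j in range(i + 1, len(S) + 1):
--
--             sub = S[i:j]
--             if len(sub) <= MaxN:
--                 subsets.append(sub)
--             else:
--                 break
--     """
--     return subsets
--
-- def make_partial_order_relation_of_set(S, N = -1):
--     P = sub_sets(S,N)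
--     Names = make_set_names(P)
--     res = []
--     for i in range(len(P)):
--         x = P[i]
--         xs = set(x)
--         pname = "bsubst_of_%s"%Names[i]
--         res.append("")
--         res.append("% \"bsubst_of\" relations for " + Names[i] + ".\n")
--         decl = ":- modeb(*,%s(+bobj))?"%pname
--         res.append(decl)
--         for j in range(len(P)):
--             y = P[j]
--             ys = set(y)
--             if ys.issubset(xs):# and not(xs.issubset(ys)):
--                 rel = "%s(%s)."%(pname,Names[j])
--                 res.append(rel)
--     return res
-- ===== SOURCE B (Python) =====
-- def set_to_string(s):
--     ss = sorted(s)
--     if not ss: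
--         return "bsetEmpty"
--     return "bset" + "".join("_" + str(x) for x in ss)
--
-- def _subseqs(l):
--     if not l:
--         return [[]]
--     rest = _subseqs(l[1:])
--     return rest + [[l[0]] + r for r in rest]
--
-- def _bounded(l, k):
--     if not l:
--         return [[]]
--     if k <= 0:
--         return [[]]
--     return _bounded(l[1:], k) + [[l[0]] + r for r in _bounded(l[1:], k - 1)]
--
-- def make_partial_order_relation_of_set(S, N = -1):
--     maxn = len(S) if N == -1 else N
--     base = sorted(set(S))
--     P = sorted(_bounded(base, maxn))
--     res = []
--     for x in P:
--         name = set_to_string(x)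
--         pname = "bsubst_of_%s" % name
--         res.append("")
--         res.append("% \"bsubst_of\" relations for " + name + ".\n")
--         res.append(":- modeb(*,%s(+bobj))?" % pname)
--         for y in sorted(_subseqs(x)):
--             res.append("%s(%s)." % (pname, set_to_string(y)))
--     return res
-- ===== Notes on version B (the rewrite author's own statement) =====
-- stated objective: faster
-- what changed: A enumerates the power set by a BFS fixpoint loop that re-sorts each candidate and dedups it by scanning the ever-growing subset list, then emits relations by testing every pair (x,y) of P with a set-subset check; B builds P in one pass by size-bounded subsequence doubling over sorted(set(S)) plus one sort, and for each x generates x's own power set directly, removing the quadratic-in-|P| membership scans and the |P|^2 subset tests; intended as faster (for N=-1 the output itself is exponential and both are output-bound).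
import Mathlib
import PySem

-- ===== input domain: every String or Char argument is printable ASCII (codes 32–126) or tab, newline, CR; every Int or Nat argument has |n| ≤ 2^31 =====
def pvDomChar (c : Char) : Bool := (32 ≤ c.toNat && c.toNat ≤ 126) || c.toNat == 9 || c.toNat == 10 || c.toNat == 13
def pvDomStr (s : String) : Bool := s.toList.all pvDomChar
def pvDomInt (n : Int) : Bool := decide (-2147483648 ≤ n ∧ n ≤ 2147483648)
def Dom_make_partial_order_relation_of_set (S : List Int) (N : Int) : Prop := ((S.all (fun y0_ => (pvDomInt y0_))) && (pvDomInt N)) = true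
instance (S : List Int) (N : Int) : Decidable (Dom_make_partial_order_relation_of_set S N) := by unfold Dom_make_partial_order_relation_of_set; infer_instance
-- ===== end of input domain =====

-- B replaces A's fixpoint enumeration (repeated list-membership dedup over all of P, then a full
-- scan of P per element with a set-subset test) by a size-bounded subsequence-doubling power-set
-- construction and, per element x, direct generation of x's own power set. Intended as faster
-- (for N = -1 the output itself grows exponentially, so there both are output-bound).

-- ===== PORT A =====
-- set_to_string: strings are built as List Char (PySem.Chars side) and packed with String.ofList at emission.
def pvA_set_to_string (s : List Int) : List Char :=
  let ss := PySem.List.sorted s (fun v => v) false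
  let y := ss.foldl (fun y x => y ++ '_' :: PySem.Int.toChars x) "bset".toList
  if y = "bset".toList then "bsetEmpty".toList else y

def pvA_make_set_names (P : List (List Int)) : List (List Char) :=
  P.foldl (fun res x => res ++ [pvA_set_to_string x]) []

-- one pass of A's `while True` body building `newsets`
def pvA_step (S : List Int) (MaxN : Int) (subsets : List (List Int)) : List (List Int) :=
  subsets.foldl (fun newsets x =>
    S.foldl (fun newsets u =>
      if u ∈ x then newsets
      else
        let y := PySem.List.sorted (x ++ [u]) (fun v => v) false
        if y ∈ subsets then newsets
        else if y ∈ newsets then newsets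
        else if (y.length : Int) > MaxN then newsets
        else newsets ++ [y]) newsets) []

-- A's unbounded `while True: … if newsets == []: break` loop; the fuel S.length + 2 provably
-- reaches the fixpoint (the loop adds only subsets of size = iteration count), see pvA_loop_char.
def pvA_loop (S : List Int) (MaxN : Int) : Nat → List (List Int) → List (List Int)
  | 0, subsets => subsets
  | fuel + 1, subsets =>
    let newsets := pvA_step S MaxN subsets
    if newsets = [] then subsets else pvA_loop S MaxN fuel (subsets ++ newsets)

def pvA_sub_sets (S : List Int) (N : Int) : List (List Int) :=
  let MaxN : Int := if N = -1 then (S.length : Int) else N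
  let subsets := pvA_loop S MaxN (S.length + 2) [[]]
  PySem.List.sorted subsets (fun v => v) false

def make_partial_order_relation_of_set (S : List Int) (N : Int) : List String :=
  let P := pvA_sub_sets S N
  let Names := pvA_make_set_names P
  (List.range P.length).foldl (fun res i =>
    let x := P.getD i []
    let xs : PySem.Set Int := PySem.Set.ofList x
    let pname := "bsubst_of_".toList ++ Names.getD i []
    let res := res ++ [String.ofList [],
      String.ofList ("% \"bsubst_of\" relations for ".toList ++ Names.getD i [] ++ ".\n".toList),
      String.ofList (":- modeb(*,".toList ++ pname ++ "(+bobj))?".toList)]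
    (List.range P.length).foldl (fun res j =>
      let y := P.getD j []
      let ys : PySem.Set Int := PySem.Set.ofList y
      if PySem.Set.issubset ys xs then
        res ++ [String.ofList (pname ++ '(' :: Names.getD j [] ++ ").".toList)]
      else res) res) []

-- ===== PORT B =====
def pvB_set_to_string (s : List Int) : List Char :=
  let ss := PySem.List.sorted s (fun v => v) false
  if ss = [] then "bsetEmpty".toList
  else "bset".toList ++ (ss.map (fun x => '_' :: PySem.Int.toChars x)).flatten

def pvB_subseqs : List Int → List (List Int)
  | [] => [[]]
  | h :: t => pvB_subseqs t ++ (pvB_subseqs t).map (fun r => h :: r)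

def pvB_bounded : List Int → Int → List (List Int)
  | [], _ => [[]]
  | h :: t, k =>
    if k ≤ 0 then [[]]
    else pvB_bounded t k ++ (pvB_bounded t (k - 1)).map (fun r => h :: r)

def make_partial_order_relation_of_set_alt (S : List Int) (N : Int) : List String :=
  let maxn : Int := if N = -1 then (S.length : Int) else N
  let base := PySem.List.sorted (PySem.Set.ofList S) (fun v => v) false
  let P := PySem.List.sorted (pvB_bounded base maxn) (fun v => v) false
  P.foldl (fun res x =>
    let name := pvB_set_to_string x
    let pname := "bsubst_of_".toList ++ name
    let res := res ++ [String.ofList [],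
      String.ofList ("% \"bsubst_of\" relations for ".toList ++ name ++ ".\n".toList),
      String.ofList (":- modeb(*,".toList ++ pname ++ "(+bobj))?".toList)]
    (PySem.List.sorted (pvB_subseqs x) (fun v => v) false).foldl
      (fun res y => res ++ [String.ofList (pname ++ '(' :: pvB_set_to_string y ++ ").".toList)]) res) []

-- ===== PRECONDITION & SPEC =====
def Spec_make_partial_order_relation_of_set (S : List Int) (N : Int) (out : List String) : Prop := out = make_partial_order_relation_of_set_alt S N
instance (S : List Int) (N : Int) (out : List String) : Decidable (Spec_make_partial_order_relation_of_set S N out) := by unfold Spec_make_partial_order_relation_of_set; infer_instance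

-- ===== CLAIM (what is proved, stated in full; the proofs are below) =====
def Claim_equal_make_partial_order_relation_of_set : Prop := ∀ (S : List Int) (N : Int), Dom_make_partial_order_relation_of_set S N → Spec_make_partial_order_relation_of_set S N (make_partial_order_relation_of_set S N)

-- ===== LEMMAS AND PROOFS =====

-- `pvOk S y`: y is a strictly sorted list of values of S — a canonical subset of S.
def pvOk (S y : List Int) : Prop := y.Pairwise (· < ·) ∧ ∀ v ∈ y, v ∈ S

-- what A's loop holds after k rounds: subsets of size ≤ k (and ≤ MaxN unless empty)
def pvSk (S : List Int) (M : Int) (k : Nat) (y : List Int) : Prop :=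
  pvOk S y ∧ y.length ≤ k ∧ (y = [] ∨ (y.length : Int) ≤ M)

-- the collection A's loop converges to and B builds directly
def pvF (S : List Int) (M : Int) (y : List Int) : Prop :=
  pvOk S y ∧ (y = [] ∨ (y.length : Int) ≤ M)

def pvCand (S : List Int) (M : Int) (subsets : List (List Int)) (x y : List Int) : Prop :=
  (∃ u ∈ S, u ∉ x ∧ y = PySem.List.sorted (x ++ [u]) (fun v => v) false) ∧
    y ∉ subsets ∧ ¬((y.length : Int) > M)

theorem pv_lt_of_le_nodup (l : List Int) (h1 : l.Pairwise (· ≤ ·)) (h2 : l.Nodup) :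
    l.Pairwise (· < ·) := (h1.and h2).imp (fun h => lt_of_le_of_ne h.1 h.2)

theorem pv_nodup_of_lt (l : List Int) (h : l.Pairwise (· < ·)) : l.Nodup :=
  h.imp (fun h => ne_of_lt h)


theorem pv_sublist_of_sorted_subset (x y : List Int) (hx : x.Pairwise (· < ·))
    (hy : y.Pairwise (· < ·)) (h : ∀ v ∈ y, v ∈ x) : y.Sublist x := by
  induction x generalizing y with
  | nil =>
    cases y with
    | nil => exact List.Sublist.refl _
    | cons b t => exact absurd (h b (by simp)) (by simp)
  | cons a x' ih =>
    cases y with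
    | nil => exact List.nil_sublist _
    | cons b y' =>
      have hx' : x'.Pairwise (· < ·) := hx.tail
      have hy' : y'.Pairwise (· < ·) := hy.tail
      by_cases hba : b = a
      · subst hba
        refine List.Sublist.cons₂ _ (ih y' hx' hy' ?_)
        intro v hv
        have hbv : b < v := (List.pairwise_cons.mp hy).1 v hv
        rcases List.mem_cons.mp (h v (List.mem_cons_of_mem _ hv)) with rfl | hvx'
        · omega
        · exact hvx'
      · have hbx' : b ∈ x' := by
          rcases List.mem_cons.mp (h b List.mem_cons_self) with rfl | h'
          · exact absurd rfl hba
          · exact h'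
        have hab : a < b := (List.pairwise_cons.mp hx).1 b hbx'
        refine List.Sublist.cons _ (ih (b :: y') hx' hy ?_)
        intro v hv
        have hbv : b ≤ v := by
          rcases List.mem_cons.mp hv with rfl | h'
          · omega
          · have := (List.pairwise_cons.mp hy).1 v h'
            omega
        rcases List.mem_cons.mp (h v hv) with rfl | hvx'
        · omega
        · exact hvx'

theorem pv_mem_subseqs (l y : List Int) : y ∈ pvB_subseqs l ↔ y.Sublist l := by
  induction l generalizing y with
  | nil => simp [pvB_subseqs, List.sublist_nil]
  | cons a t ih =>
    simp only [pvB_subseqs, List.mem_append, List.mem_map, List.sublist_cons_iff]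
    constructor
    · rintro (h | ⟨r, hr, rfl⟩)
      · exact Or.inl ((ih y).mp h)
      · exact Or.inr ⟨r, rfl, (ih r).mp hr⟩
    · rintro (h | ⟨r, rfl, hr⟩)
      · exact Or.inl ((ih y).mpr h)
      · exact Or.inr ⟨r, (ih r).mpr hr, rfl⟩

theorem pv_nodup_subseqs (l : List Int) (h : l.Nodup) : (pvB_subseqs l).Nodup := by
  induction l with
  | nil => simp [pvB_subseqs]
  | cons a t ih =>
    have hat : a ∉ t := (List.nodup_cons.mp h).1
    have ht := ih (List.nodup_cons.mp h).2
    refine List.Nodup.append ht (ht.map ?_) ?_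
    · intro r s hrs; simpa using hrs
    · intro y hy hy2
      rcases List.mem_map.mp hy2 with ⟨r, _, rfl⟩
      have : (a :: r).Sublist t := (pv_mem_subseqs t _).mp hy
      exact hat (this.subset (by simp))

theorem pv_strings_eq (s : List Int) : pvA_set_to_string s = pvB_set_to_string s := by
  show (let ss := PySem.List.sorted s (fun v => v) false
    let y := ss.foldl (fun y x => y ++ '_' :: PySem.Int.toChars x) "bset".toList
    if y = "bset".toList then "bsetEmpty".toList else y) = _
  simp only [PySem.List.foldl_append_eq_flatMap]
  cases hss : PySem.List.sorted s (fun v => v) false with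
  | nil => simp [pvB_set_to_string, hss]
  | cons a l => simp [pvB_set_to_string, hss, List.flatMap_def]



theorem pv_inner_char (S : List Int) (M : Int) (subsets : List (List Int)) (x : List Int) :
    ∀ (l : List Int) (acc : List (List Int)), acc.Nodup →
    (l.foldl (fun newsets u =>
      if u ∈ x then newsets
      else
        let y := PySem.List.sorted (x ++ [u]) (fun v => v) false
        if y ∈ subsets then newsets
        else if y ∈ newsets then newsets
        else if (y.length : Int) > M then newsets
        else newsets ++ [y]) acc).Nodup ∧
    ∀ y, y ∈ (l.foldl (fun newsets u =>
      if u ∈ x then newsets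
      else
        let y := PySem.List.sorted (x ++ [u]) (fun v => v) false
        if y ∈ subsets then newsets
        else if y ∈ newsets then newsets
        else if (y.length : Int) > M then newsets
        else newsets ++ [y]) acc) ↔
      y ∈ acc ∨ ((∃ u ∈ l, u ∉ x ∧ y = PySem.List.sorted (x ++ [u]) (fun v => v) false) ∧
        y ∉ subsets ∧ ¬((y.length : Int) > M)) := by
  intro l
  induction l with
  | nil => intro acc hacc; simp [hacc]
  | cons u l ih =>
    intro acc hacc
    simp only [List.foldl_cons]
    by_cases h1 : u ∈ x
    · simp only [if_pos h1]
      obtain ⟨hnd, hmem⟩ := ih acc hacc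
      refine ⟨hnd, fun y => (hmem y).trans ?_⟩
      constructor
      · rintro (h | ⟨⟨u', hu', hux, rfl⟩, h2, h3⟩)
        · exact Or.inl h
        · exact Or.inr ⟨⟨u', List.mem_cons_of_mem _ hu', hux, rfl⟩, h2, h3⟩
      · rintro (h | ⟨⟨u', hu', hux, rfl⟩, h2, h3⟩)
        · exact Or.inl h
        · rcases List.mem_cons.mp hu' with rfl | hu'
          · exact absurd h1 hux
          · exact Or.inr ⟨⟨u', hu', hux, rfl⟩, h2, h3⟩
    · simp only [if_neg h1]
      set yu := PySem.List.sorted (x ++ [u]) (fun v => v) false with hyu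
      by_cases h2 : yu ∈ subsets
      · simp only [if_pos h2]
        obtain ⟨hnd, hmem⟩ := ih acc hacc
        refine ⟨hnd, fun y => (hmem y).trans ?_⟩
        constructor
        · rintro (h | ⟨⟨u', hu', hux, rfl⟩, h4, h5⟩)
          · exact Or.inl h
          · exact Or.inr ⟨⟨u', List.mem_cons_of_mem _ hu', hux, rfl⟩, h4, h5⟩
        · rintro (h | ⟨⟨u', hu', hux, rfl⟩, h4, h5⟩)
          · exact Or.inl h
          · rcases List.mem_cons.mp hu' with rfl | hu'
            · exact absurd h2 h4
            · exact Or.inr ⟨⟨u', hu', hux, rfl⟩, h4, h5⟩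
      · simp only [if_neg h2]
        by_cases h3 : yu ∈ acc
        · simp only [if_pos h3]
          obtain ⟨hnd, hmem⟩ := ih acc hacc
          refine ⟨hnd, fun y => (hmem y).trans ?_⟩
          constructor
          · rintro (h | ⟨⟨u', hu', hux, rfl⟩, h4, h5⟩)
            · exact Or.inl h
            · exact Or.inr ⟨⟨u', List.mem_cons_of_mem _ hu', hux, rfl⟩, h4, h5⟩
          · rintro (h | ⟨⟨u', hu', hux, rfl⟩, h4, h5⟩)
            · exact Or.inl h
            · rcases List.mem_cons.mp hu' with rfl | hu'
              · exact Or.inl h3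
              · exact Or.inr ⟨⟨u', hu', hux, rfl⟩, h4, h5⟩
        · simp only [if_neg h3]
          by_cases h4 : (yu.length : Int) > M
          · simp only [if_pos h4]
            obtain ⟨hnd, hmem⟩ := ih acc hacc
            refine ⟨hnd, fun y => (hmem y).trans ?_⟩
            constructor
            · rintro (h | ⟨⟨u', hu', hux, rfl⟩, h5, h6⟩)
              · exact Or.inl h
              · exact Or.inr ⟨⟨u', List.mem_cons_of_mem _ hu', hux, rfl⟩, h5, h6⟩
            · rintro (h | ⟨⟨u', hu', hux, rfl⟩, h5, h6⟩)
              · exact Or.inl h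
              · rcases List.mem_cons.mp hu' with rfl | hu'
                · exact absurd h4 h6
                · exact Or.inr ⟨⟨u', hu', hux, rfl⟩, h5, h6⟩
          · simp only [if_neg h4]
            obtain ⟨hnd, hmem⟩ := ih (acc ++ [yu]) (by
              refine List.Nodup.append hacc (by simp) ?_
              intro a ha hb; simp at hb; subst hb; exact h3 ha)
            refine ⟨hnd, fun y => (hmem y).trans ?_⟩
            simp only [List.mem_append, List.mem_singleton]
            constructor
            · rintro ((h | rfl) | ⟨⟨u', hu', hux, rfl⟩, h5, h6⟩)
              · exact Or.inl h
              · exact Or.inr ⟨⟨u, List.mem_cons_self, h1, hyu⟩, h2, h4⟩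
              · exact Or.inr ⟨⟨u', List.mem_cons_of_mem _ hu', hux, rfl⟩, h5, h6⟩
            · rintro (h | ⟨⟨u', hu', hux, rfl⟩, h5, h6⟩)
              · exact Or.inl (Or.inl h)
              · rcases List.mem_cons.mp hu' with rfl | hu'
                · exact Or.inl (Or.inr hyu)
                · exact Or.inr ⟨⟨u', hu', hux, rfl⟩, h5, h6⟩

theorem pv_outer_char (S : List Int) (M : Int) (subsets : List (List Int)) :
    ∀ (l : List (List Int)) (acc : List (List Int)), acc.Nodup →
    (l.foldl (fun newsets x =>
      S.foldl (fun newsets u =>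
        if u ∈ x then newsets
        else
          let y := PySem.List.sorted (x ++ [u]) (fun v => v) false
          if y ∈ subsets then newsets
          else if y ∈ newsets then newsets
          else if (y.length : Int) > M then newsets
          else newsets ++ [y]) newsets) acc).Nodup ∧
    ∀ y, y ∈ (l.foldl (fun newsets x =>
      S.foldl (fun newsets u =>
        if u ∈ x then newsets
        else
          let y := PySem.List.sorted (x ++ [u]) (fun v => v) false
          if y ∈ subsets then newsets
          else if y ∈ newsets then newsets
          else if (y.length : Int) > M then newsets
          else newsets ++ [y]) newsets) acc) ↔
      y ∈ acc ∨ ∃ x ∈ l, pvCand S M subsets x y := by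
  intro l
  induction l with
  | nil => intro acc hacc; simp [hacc]
  | cons x l ih =>
    intro acc hacc
    simp only [List.foldl_cons]
    obtain ⟨hnd1, hmem1⟩ := pv_inner_char S M subsets x S acc hacc
    obtain ⟨hnd2, hmem2⟩ := ih _ hnd1
    refine ⟨hnd2, fun y => (hmem2 y).trans ?_⟩
    rw [hmem1 y]
    simp only [List.mem_cons, pvCand]
    constructor
    · rintro ((h | h) | ⟨x', hx', h⟩)
      · exact Or.inl h
      · exact Or.inr ⟨x, Or.inl rfl, h⟩
      · exact Or.inr ⟨x', Or.inr hx', h⟩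
    · rintro (h | ⟨x', (rfl | hx'), h⟩)
      · exact Or.inl (Or.inl h)
      · exact Or.inl (Or.inr h)
      · exact Or.inr ⟨x', hx', h⟩

theorem pv_step_nodup_mem (S : List Int) (M : Int) (subsets : List (List Int)) :
    (pvA_step S M subsets).Nodup ∧
      ∀ y, y ∈ pvA_step S M subsets ↔ ∃ x ∈ subsets, pvCand S M subsets x y := by
  obtain ⟨h1, h2⟩ := pv_outer_char S M subsets subsets [] (by simp)
  exact ⟨h1, fun y => by rw [pvA_step]; rw [h2 y]; simp⟩






theorem pv_step_iff (S : List Int) (M : Int) (k : Nat) (subsets : List (List Int))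
    (hmem : ∀ y, y ∈ subsets ↔ pvSk S M k y) (y : List Int) :
    y ∈ pvA_step S M subsets ↔ (pvSk S M (k+1) y ∧ ¬ pvSk S M k y) := by
  rw [(pv_step_nodup_mem S M subsets).2 y]
  constructor
  · rintro ⟨x, hxmem, ⟨u, huS, hux, rfl⟩, hns, hlen⟩
    obtain ⟨⟨hxp, hxS⟩, hxk, _⟩ := (hmem x).mp hxmem
    set yu := PySem.List.sorted (x ++ [u]) (fun v => v) false with hyu
    have hperm : yu.Perm (x ++ [u]) := PySem.List.sorted_perm _ _ _
    have hxu_nodup : (x ++ [u]).Nodup := by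
      simp only [List.nodup_append, List.nodup_cons, List.not_mem_nil, not_false_iff, List.nodup_nil]
      refine ⟨pv_nodup_of_lt x hxp, by simp, ?_⟩
      intro a ha b hb; simp at hb; subst hb; exact fun h => hux (h ▸ ha)
    have hynd : yu.Nodup := hperm.nodup_iff.mpr hxu_nodup
    have hyle : yu.Pairwise (· ≤ ·) := by
      have := PySem.List.sorted_pairwise (xs := x ++ [u]) (key := fun v => v)
      simpa using this
    have hylt := pv_lt_of_le_nodup _ hyle hynd
    have hyS : ∀ v ∈ yu, v ∈ S := by
      intro v hv
      rcases (List.mem_append.mp (hperm.mem_iff.mp hv)) with h | h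
      · exact hxS v h
      · simp at h; subst h; exact huS
    have hylen : yu.length = x.length + 1 := by
      rw [hperm.length_eq, List.length_append, List.length_singleton]
    refine ⟨⟨⟨hylt, hyS⟩, by omega, Or.inr (by omega)⟩, ?_⟩
    intro hSk; exact hns ((hmem _).mpr hSk)
  · rintro ⟨⟨⟨hylt, hyS⟩, hylen, hyM⟩, hnot⟩
    have hne : y ≠ [] := by
      rintro rfl
      exact hnot ⟨⟨List.Pairwise.nil, by simp⟩, by simp, Or.inl rfl⟩
    have hM : (y.length : Int) ≤ M := by
      rcases hyM with rfl | h
      · exact absurd rfl hne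
      · exact h
    have hklen : y.length = k + 1 := by
      by_contra hcon
      exact hnot ⟨⟨hylt, hyS⟩, by omega, Or.inr hM⟩
    have hdecomp := (List.dropLast_append_getLast hne).symm
    set x := y.dropLast with hx
    set u := y.getLast hne with hu
    have hxlt : x.Pairwise (· < ·) := hylt.sublist (List.dropLast_sublist y)
    have hxlen : x.length = k := by rw [hx, List.length_dropLast]; omega
    have hult : ∀ a ∈ x, a < u := by
      have := hylt
      rw [hdecomp] at this
      have h2 := List.pairwise_append.mp this
      intro a ha; exact h2.2.2 a ha u (by simp)
    have hunx : u ∉ x := fun h => absurd (hult u h) (lt_irrefl u)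
    refine ⟨x, (hmem x).mpr ⟨⟨hxlt, fun v hv => hyS v ((List.dropLast_sublist y).subset hv)⟩,
      by omega, Or.inr (by omega)⟩,
      ⟨u, hyS u (List.getLast_mem hne), hunx, ?_⟩,
      fun h => hnot ((hmem y).mp h), by omega⟩
    have hp : (x ++ [u]).Pairwise (fun a b => (fun v : Int => v) a ≤ (fun v : Int => v) b) := by
      rw [← hdecomp]; exact hylt.imp (fun h => le_of_lt h)
    rw [hdecomp]
    exact (PySem.List.sorted_eq_self_of_pairwise _ _ hp).symm

theorem pv_len_le (S y : List Int) (h : pvOk S y) : y.length ≤ S.length := by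
  have hnd : y.Nodup := pv_nodup_of_lt y h.1
  calc y.length = y.toFinset.card := (List.toFinset_card_of_nodup hnd).symm
    _ ≤ S.toFinset.card := Finset.card_le_card (fun v hv => by
        simp only [List.mem_toFinset] at *; exact h.2 v hv)
    _ ≤ S.length := S.toFinset_card_le

theorem pv_saturated (S : List Int) (M : Int) (k : Nat)
    (hsat : ∀ y, pvSk S M (k+1) y → pvSk S M k y) :
    ∀ y, pvF S M y → pvSk S M k y := by
  rintro y ⟨hok, hM⟩
  by_cases hlen : y.length ≤ k
  · exact ⟨hok, hlen, hM⟩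
  · exfalso
    have hMy : (y.length : Int) ≤ M := by
      rcases hM with rfl | h
      · simp at hlen
      · exact h
    set y' := y.take (k+1) with hy'
    have hsub : y'.Sublist y := List.take_sublist _ _
    have hlen' : y'.length = k + 1 := by
      rw [hy', List.length_take]; omega
    have hok' : pvOk S y' := ⟨hok.1.sublist hsub, fun v hv => hok.2 v (hsub.subset hv)⟩
    have : pvSk S M (k+1) y' := ⟨hok', by omega, Or.inr (by omega)⟩
    have := (hsat y' this).2.1
    omega


theorem pv_loop_char (S : List Int) (M : Int) : ∀ (fuel k : Nat) (subsets : List (List Int)),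
    subsets.Nodup → (∀ y, y ∈ subsets ↔ pvSk S M k y) → S.length + 1 ≤ fuel + k →
    (pvA_loop S M fuel subsets).Nodup ∧ (∀ y, y ∈ pvA_loop S M fuel subsets ↔ pvF S M y) := by
  intro fuel
  induction fuel with
  | zero =>
    intro k subsets hnd hmem hk
    refine ⟨hnd, fun y => (hmem y).trans ?_⟩
    constructor
    · rintro ⟨hok, _, hM⟩; exact ⟨hok, hM⟩
    · rintro ⟨hok, hM⟩
      exact ⟨hok, le_trans (pv_len_le S y hok) (by omega), hM⟩
  | succ fuel ih =>
    intro k subsets hnd hmem hk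
    rw [pvA_loop]
    by_cases hempty : pvA_step S M subsets = []
    · simp only [if_pos hempty]
      have hsat : ∀ y, pvSk S M (k+1) y → pvSk S M k y := by
        intro y hy
        by_contra hny
        have : y ∈ pvA_step S M subsets := (pv_step_iff S M k subsets hmem y).mpr ⟨hy, hny⟩
        rw [hempty] at this; exact absurd this (List.not_mem_nil)
      refine ⟨hnd, fun y => (hmem y).trans ?_⟩
      constructor
      · rintro ⟨hok, _, hM⟩; exact ⟨hok, hM⟩
      · exact fun h => pv_saturated S M k hsat y h
    · simp only [if_neg hempty]
      obtain ⟨hndstep, _⟩ := pv_step_nodup_mem S M subsets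
      refine ih (k+1) _ (List.Nodup.append hnd hndstep ?_) ?_ (by omega)
      · intro y hy hy2
        have := (pv_step_iff S M k subsets hmem y).mp hy2
        exact this.2 ((hmem y).mp hy)
      · intro y
        rw [List.mem_append, hmem y, pv_step_iff S M k subsets hmem y]
        constructor
        · rintro (h | ⟨h, _⟩)
          · exact ⟨h.1, by have := h.2.1; omega, h.2.2⟩
          · exact h
        · intro h
          by_cases hky : pvSk S M k y
          · exact Or.inl hky
          · exact Or.inr ⟨h, hky⟩



theorem pv_base_facts (S : List Int) :
    (PySem.List.sorted (PySem.Set.ofList S) (fun v => v) false).Pairwise (· < ·) ∧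
    ∀ v, v ∈ PySem.List.sorted (PySem.Set.ofList S) (fun v => v) false ↔ v ∈ S := by
  constructor
  · exact PySem.List.sorted_ofList_pairwise_lt S
  · intro v
    rw [PySem.List.mem_sorted, PySem.Set.mem_ofList]

theorem pv_mem_bounded (l : List Int) : ∀ (k : Int) (y : List Int),
    y ∈ pvB_bounded l k ↔ y.Sublist l ∧ (y = [] ∨ (y.length : Int) ≤ k) := by
  induction l with
  | nil =>
    intro k y
    simp only [pvB_bounded, List.mem_singleton, List.sublist_nil]
    constructor
    · rintro rfl; exact ⟨rfl, Or.inl rfl⟩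
    · rintro ⟨rfl, _⟩; rfl
  | cons h t ih =>
    intro k y
    rw [pvB_bounded]
    by_cases hk : k ≤ 0
    · simp only [if_pos hk, List.mem_singleton]
      constructor
      · rintro rfl; exact ⟨List.nil_sublist _, Or.inl rfl⟩
      · rintro ⟨_, rfl | hlen⟩
        · rfl
        · cases y with
          | nil => rfl
          | cons a t2 => exfalso; simp at hlen; omega
    · simp only [if_neg hk, List.mem_append, List.mem_map]
      rw [not_le] at hk
      constructor
      · rintro (hy | ⟨r, hr, rfl⟩)
        · obtain ⟨hs, hc⟩ := (ih k y).mp hy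
          exact ⟨hs.trans (List.sublist_cons_self h t), hc⟩
        · obtain ⟨hs, hc⟩ := (ih (k - 1) r).mp hr
          refine ⟨hs.cons₂ h, Or.inr ?_⟩
          rcases hc with rfl | hlen
          · simp; omega
          · simp; omega
      · rintro ⟨hs, hc⟩
        rcases List.sublist_cons_iff.mp hs with hy | ⟨r, rfl, hr⟩
        · exact Or.inl ((ih k y).mpr ⟨hy, hc⟩)
        · refine Or.inr ⟨r, (ih (k - 1) r).mpr ⟨hr, ?_⟩, rfl⟩
          rcases hc with h' | hlen
          · simp at h'
          · simp at hlen
            rcases List.eq_nil_or_concat r with rfl | _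
            · exact Or.inl rfl
            · exact Or.inr (by omega)

theorem pv_nodup_bounded (l : List Int) (hl : l.Nodup) : ∀ (k : Int), (pvB_bounded l k).Nodup := by
  induction l with
  | nil => intro k; simp [pvB_bounded]
  | cons h t ih =>
    intro k
    rw [pvB_bounded]
    by_cases hk : k ≤ 0
    · simp [if_pos hk]
    · simp only [if_neg hk]
      have hht : h ∉ t := (List.nodup_cons.mp hl).1
      have ht := (List.nodup_cons.mp hl).2
      refine List.Nodup.append (ih ht k) ((ih ht (k - 1)).map ?_) ?_
      · intro r s hrs; simpa using hrs
      · intro y hy hy2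
        rcases List.mem_map.mp hy2 with ⟨r, _, rfl⟩
        have : (h :: r).Sublist t := ((pv_mem_bounded t k _).mp hy).1
        exact hht (this.subset (by simp))

theorem pv_LB_facts (S : List Int) (M : Int) :
    (pvB_bounded (PySem.List.sorted (PySem.Set.ofList S) (fun v => v) false) M).Nodup ∧
    ∀ y, y ∈ pvB_bounded (PySem.List.sorted (PySem.Set.ofList S) (fun v => v) false) M ↔
      pvF S M y := by
  obtain ⟨hbp, hbm⟩ := pv_base_facts S
  set base := PySem.List.sorted (PySem.Set.ofList S) (fun v => v) false with hbase
  have hbnd : base.Nodup := pv_nodup_of_lt base hbp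
  have hsub : ∀ y : List Int, y.Sublist base ↔ pvOk S y := by
    intro y
    constructor
    · intro h
      exact ⟨hbp.sublist h, fun v hv => (hbm v).mp (h.subset hv)⟩
    · rintro ⟨h1, h2⟩
      exact pv_sublist_of_sorted_subset base y hbp h1 (fun v hv => (hbm v).mpr (h2 v hv))
  refine ⟨pv_nodup_bounded base hbnd M, ?_⟩
  intro y
  rw [pv_mem_bounded base M y, hsub y]
  exact Iff.rfl

theorem pv_sorted_inst (xs : List (List Int)) :
    PySem.List.sorted xs (fun v => v) false
      = @PySem.List.sorted (List Int) (List Int) List.instLinearOrder.toLT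
          LinearOrder.toDecidableLT xs (fun v => v) false := by
  congr 1

theorem pv_P_eq (S : List Int) (N : Int) :
    pvA_sub_sets S N = PySem.List.sorted
      (pvB_bounded (PySem.List.sorted (PySem.Set.ofList S) (fun v => v) false)
        (if N = -1 then (S.length : Int) else N))
      (fun v => v) false := by
  set M : Int := if N = -1 then (S.length : Int) else N with hM
  have hstart : ∀ y, y ∈ ([[]] : List (List Int)) ↔ pvSk S M 0 y := by
    intro y
    simp only [List.mem_singleton, pvSk]
    constructor
    · rintro rfl; exact ⟨⟨List.Pairwise.nil, by simp⟩, by simp, Or.inl rfl⟩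
    · rintro ⟨_, hl, _⟩; exact List.length_eq_zero_iff.mp (by omega)
  obtain ⟨hnd, hmem⟩ := pv_loop_char S M (S.length + 2) 0 [[]] (by simp) hstart (by omega)
  obtain ⟨hnd2, hmem2⟩ := pv_LB_facts S M
  have hperm : (pvA_loop S M (S.length + 2) [[]]).Perm
      (pvB_bounded (PySem.List.sorted (PySem.Set.ofList S) (fun v => v) false) M) := by
    rw [List.perm_ext_iff_of_nodup hnd hnd2]
    intro y; rw [hmem y, hmem2 y]
  rw [pvA_sub_sets]
  rw [pv_sorted_inst, pv_sorted_inst]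
  exact PySem.List.sorted_eq_sorted_of_perm _ _ _ (fun a b h => h) hperm

theorem pv_foldl_range_getD {α β : Type} (l : List α) (d : α) (g : β → α → β) (init : β) :
    (List.range l.length).foldl (fun acc i => g acc (l.getD i d)) init = l.foldl g init := by
  induction l generalizing init with
  | nil => simp
  | cons a t ih =>
    rw [List.length_cons, List.range_succ_eq_map, List.foldl_cons, List.foldl_map]
    simp only [List.getD_cons_succ, List.getD_cons_zero]
    exact ih (g init a)

theorem pv_P_facts (S : List Int) (N : Int) :
    (pvA_sub_sets S N).Pairwise (· < ·) ∧
      ∀ y, y ∈ pvA_sub_sets S N ↔ pvF S (if N = -1 then (S.length : Int) else N) y := by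
  set M : Int := if N = -1 then (S.length : Int) else N with hMdef
  have hstart : ∀ y, y ∈ ([[]] : List (List Int)) ↔ pvSk S M 0 y := by
    intro y
    simp only [List.mem_singleton, pvSk]
    constructor
    · rintro rfl; exact ⟨⟨List.Pairwise.nil, by simp⟩, by simp, Or.inl rfl⟩
    · rintro ⟨_, hl, _⟩; exact List.length_eq_zero_iff.mp (by omega)
  obtain ⟨hnd, hmem⟩ := pv_loop_char S M (S.length + 2) 0 [[]] (by simp) hstart (by omega)
  constructor
  · rw [pvA_sub_sets, ← hMdef, pv_sorted_inst]
    have hle := PySem.List.sorted_pairwise (xs := pvA_loop S M (S.length + 2) [[]])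
      (key := fun v : List Int => v)
    have hnd2 := (@PySem.List.sorted_perm (List Int) (List Int) List.instLinearOrder.toLT
      LinearOrder.toDecidableLT (pvA_loop S M (S.length + 2) [[]])
      (fun v => v) false).nodup_iff.mpr hnd
    exact (hle.and hnd2).imp (fun h => lt_of_le_of_ne h.1 h.2)
  · intro y
    rw [pvA_sub_sets, ← hMdef, PySem.List.mem_sorted]
    exact hmem y

theorem pv_filter_eq (S : List Int) (N : Int) (x : List Int)
    (hx : x ∈ pvA_sub_sets S N) :
    (pvA_sub_sets S N).filter
        (fun y => PySem.Set.issubset (PySem.Set.ofList y) (PySem.Set.ofList x))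
      = PySem.List.sorted (pvB_subseqs x) (fun v => v) false := by
  obtain ⟨hp, hmem⟩ := pv_P_facts S N
  set M : Int := if N = -1 then (S.length : Int) else N with hMdef
  have hxF : pvF S M x := (hmem x).mp hx
  have hxnd : x.Nodup := pv_nodup_of_lt x hxF.1.1
  have hPnd : (pvA_sub_sets S N).Nodup := hp.imp (fun h => ne_of_lt h)
  have hmemf : ∀ y, y ∈ (pvA_sub_sets S N).filter
      (fun y => PySem.Set.issubset (PySem.Set.ofList y) (PySem.Set.ofList x)) ↔ y.Sublist x := by
    intro y
    rw [List.mem_filter, hmem y]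
    constructor
    · rintro ⟨⟨hok, _⟩, hss⟩
      refine pv_sublist_of_sorted_subset x y hxF.1.1 hok.1 ?_
      intro v hv
      have := (PySem.Set.issubset_iff _ _).mp hss v (by
        rw [PySem.Set.mem_ofList]; exact hv)
      rwa [PySem.Set.mem_ofList] at this
    · intro h
      refine ⟨⟨⟨hxF.1.1.sublist h, fun v hv => hxF.1.2 v (h.subset hv)⟩, ?_⟩, ?_⟩
      · cases hy : y with
        | nil => exact Or.inl rfl
        | cons a t =>
          have hxne : x ≠ [] := by
            rintro rfl
            rw [hy] at h
            simpa using List.sublist_nil.mp h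
          rcases hxF.2 with h' | hMx
          · exact absurd h' hxne
          · refine Or.inr ?_
            have := h.length_le
            rw [← hy]
            omega
      · refine (PySem.Set.issubset_iff _ _).mpr ?_
        intro v hv
        rw [PySem.Set.mem_ofList] at *
        exact h.subset hv
  have hnds : (pvB_subseqs x).Nodup := pv_nodup_subseqs x hxnd
  have hperm : ((pvA_sub_sets S N).filter
      (fun y => PySem.Set.issubset (PySem.Set.ofList y) (PySem.Set.ofList x))).Perm
        (pvB_subseqs x) := by
    rw [List.perm_ext_iff_of_nodup (hPnd.filter _) hnds]
    intro y
    rw [hmemf y, pv_mem_subseqs x y]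
  rw [pv_sorted_inst]
  exact (@PySem.List.sorted_eq_of_perm_of_pairwise_lt (List Int) (List Int) List.instLinearOrder
    _ _ _ hperm (hp.filter _)).symm

-- the block of output lines A and B emit for one element x of P
def pvBlock (P : List (List Int)) (x : List Int) : List String :=
  [String.ofList [],
   String.ofList ("% \"bsubst_of\" relations for ".toList ++ pvB_set_to_string x ++ ".\n".toList),
   String.ofList (":- modeb(*,".toList ++ "bsubst_of_".toList ++ pvB_set_to_string x ++ "(+bobj))?".toList)] ++
  (P.filter (fun y => PySem.Set.issubset (PySem.Set.ofList y) (PySem.Set.ofList x))).map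
    (fun y => String.ofList (("bsubst_of_".toList ++ pvB_set_to_string x) ++
      '(' :: pvB_set_to_string y ++ ").".toList))

theorem pv_A_side (P : List (List Int)) :
    (List.range P.length).foldl (fun res i =>
      (List.range P.length).foldl (fun res j =>
        if PySem.Set.issubset (PySem.Set.ofList (P.getD j [])) (PySem.Set.ofList (P.getD i [])) then
          res ++ [String.ofList (("bsubst_of_".toList ++ (P.map pvA_set_to_string).getD i []) ++
            '(' :: (P.map pvA_set_to_string).getD j [] ++ ").".toList)]
        else res)
        (res ++ [String.ofList [],
          String.ofList ("% \"bsubst_of\" relations for ".toList ++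
            (P.map pvA_set_to_string).getD i [] ++ ".\n".toList),
          String.ofList (":- modeb(*,".toList ++
            ("bsubst_of_".toList ++ (P.map pvA_set_to_string).getD i []) ++ "(+bobj))?".toList)])) []
    = P.foldl (fun res x => res ++ pvBlock P x) [] := by
  have hgd : ∀ i ∈ List.range P.length,
      (P.map pvA_set_to_string).getD i [] = pvB_set_to_string (P.getD i []) := by
    intro i hi
    have hi' : i < P.length := List.mem_range.mp hi
    rw [List.getD_eq_getElem _ _ (by simpa using hi'), List.getD_eq_getElem _ _ hi',
      List.getElem_map, pv_strings_eq]
  refine (PySem.List.foldl_congr_mem _ _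
      (fun res i => res ++ pvBlock P (P.getD i [])) _ ?_).trans
    (pv_foldl_range_getD P [] (fun res x => res ++ pvBlock P x) [])
  intro acc i hi
  rw [hgd i hi]
  refine (PySem.List.foldl_congr_mem _ _
      (fun res j => if PySem.Set.issubset (PySem.Set.ofList (P.getD j []))
          (PySem.Set.ofList (P.getD i [])) then
        res ++ [String.ofList (("bsubst_of_".toList ++ pvB_set_to_string (P.getD i [])) ++
          '(' :: pvB_set_to_string (P.getD j []) ++ ").".toList)]
      else res) _ ?_).trans ?_
  · intro acc2 j hj
    rw [hgd j hj]
  · refine (pv_foldl_range_getD P []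
      (fun res y => if PySem.Set.issubset (PySem.Set.ofList y)
          (PySem.Set.ofList (P.getD i [])) then
        res ++ [String.ofList (("bsubst_of_".toList ++ pvB_set_to_string (P.getD i [])) ++
          '(' :: pvB_set_to_string y ++ ").".toList)]
      else res) _).trans ?_
    rw [PySem.List.foldl_append_if]
    simp only [pvBlock, List.append_assoc]

-- ===== VERDICT (by name: the statement is the Claim_ definition above) =====
theorem make_partial_order_relation_of_set_spec : Claim_equal_make_partial_order_relation_of_set := by
  intro S N _
  show make_partial_order_relation_of_set S N = make_partial_order_relation_of_set_alt S N
  simp only [make_partial_order_relation_of_set, make_partial_order_relation_of_set_alt]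
  rw [← pv_P_eq S N]
  have hnames : pvA_make_set_names (pvA_sub_sets S N)
      = (pvA_sub_sets S N).map pvA_set_to_string := by
    rw [pvA_make_set_names, PySem.List.foldl_append_singleton_eq_map]; simp
  rw [hnames, pv_A_side (pvA_sub_sets S N)]
  refine PySem.List.foldl_congr_mem _ _ _ _ ?_
  intro acc x hx
  simp only [pvBlock, pv_filter_eq S N x hx, PySem.List.foldl_append_singleton_eq_map,
    List.append_assoc]
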